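-- pv_equiv track=rewrite | github.com/jianghao-jianghao-jianghao/GovAI | backend/app/api/documents.py | _check_json_truncated
-- ===== SOURCE A (Python) =====
-- def _check_json_truncated(text: str) -> bool:
--     """检测 JSON 输出是否因 token 限制而被截断（大括号/方括号不匹配）"""
--     if not text or len(text) < 50:
--         return False
--     depth_brace = 0
--     depth_bracket = 0
--     in_str = False
--     esc = False
--     for c in text:
--         if esc:
--             esc = False
--             continue
--         if c == '\\' and in_str:
--             esc = True
--             continue
--         if c == '"':
--             in_str = not in_str
--             continue
--         if in_str:
--             continue
--         if c == '{':
--             depth_brace += 1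
--         elif c == '}':
--             depth_brace -= 1
--         elif c == '[':
--             depth_bracket += 1
--         elif c == ']':
--             depth_bracket -= 1
--     return depth_brace > 0 or depth_bracket > 0
-- ===== SOURCE B (Python) =====
-- def _check_json_truncated(text: str) -> bool:
--     if not text or len(text) < 50:
--         return False
--     # Split on every quote; segments at even "string-nesting" are code, the others
--     # are string bodies.  A quote ending a string body is escaped (so the string
--     # continues) iff the body ends in an odd-length run of backslashes.
--     db = dk = 0
--     in_str = False
--     for seg in text.split('"'):
--         if not in_str:
--             db += seg.count('{') - seg.count('}')
--             dk += seg.count('[') - seg.count(']')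
--             in_str = True
--         elif (len(seg) - len(seg.rstrip('\\'))) % 2 == 0:
--             in_str = False
--     return db > 0 or dk > 0
-- ===== Notes on version B (the rewrite author's own statement) =====
-- stated objective: faster
-- what changed: Replaces A's per-character state machine (esc/in_str flags, incremental depth counters) by a split-on-quote decomposition: the text is split at every quote character into alternating code/string segments, brackets are tallied with str.count on the code segments only, and an escaped closing quote is recognised by the parity of the trailing backslash run of the string segment (via str.rstrip).
import Mathlib
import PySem

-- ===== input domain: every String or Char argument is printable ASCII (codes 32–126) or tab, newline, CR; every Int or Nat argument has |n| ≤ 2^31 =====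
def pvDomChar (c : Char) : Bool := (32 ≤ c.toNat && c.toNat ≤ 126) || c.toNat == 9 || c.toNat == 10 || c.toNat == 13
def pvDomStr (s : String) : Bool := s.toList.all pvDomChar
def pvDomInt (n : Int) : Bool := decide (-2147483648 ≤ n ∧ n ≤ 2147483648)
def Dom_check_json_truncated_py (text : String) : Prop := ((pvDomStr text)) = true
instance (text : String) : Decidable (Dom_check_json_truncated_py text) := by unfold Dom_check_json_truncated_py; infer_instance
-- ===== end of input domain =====

set_option maxHeartbeats 1000000


-- B replaces A's per-character esc/in_str state machine by split-on-quote segments: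
-- brackets are counted on the code segments, an escaped quote is detected by the parity
-- of the trailing backslash run of a string segment (return value only; no mutation).

-- ===== PORT A =====
-- A's for-loop over the characters, state (depth_brace, depth_bracket, in_str, esc), branches in order
def pvLoopA : List Char → Int → Int → Bool → Bool → Int × Int
  | [], db, dk, _, _ => (db, dk)
  | c :: cs, db, dk, instr, esc =>
    if esc then pvLoopA cs db dk instr false
    else if c = '\\' ∧ instr = true then pvLoopA cs db dk instr true
    else if c = '"' then pvLoopA cs db dk (!instr) esc
    else if instr then pvLoopA cs db dk instr esc
    else if c = '{' then pvLoopA cs (db + 1) dk instr esc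
    else if c = '}' then pvLoopA cs (db - 1) dk instr esc
    else if c = '[' then pvLoopA cs db (dk + 1) instr esc
    else if c = ']' then pvLoopA cs db (dk - 1) instr esc
    else pvLoopA cs db dk instr esc

def check_json_truncated_py (text : String) : Bool :=
  if text = "" ∨ PySem.Str.len text < 50 then false
  else
    let st := pvLoopA text.toList 0 0 false false
    decide (st.1 > 0) || decide (st.2 > 0)

-- ===== PORT B =====
-- exact port of text.split('"') on the character list (split never yields [])
def pvSplitQ : List Char → List (List Char)
  | [] => [[]]
  | c :: cs =>
    if c = '"' then [] :: pvSplitQ cs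
    else
      match pvSplitQ cs with
      | s :: r => (c :: s) :: r
      | [] => [[c]]

-- exact port of len(seg) - len(seg.rstrip('\\'))
def pvRunBS (seg : List Char) : Nat :=
  seg.length - ((seg.reverse.dropWhile (fun c => c == '\\')).reverse).length

-- Source B's for-loop over the segments, state (db, dk, in_str)
def pvLoopB : List (List Char) → Int → Int → Bool → Int × Int
  | [], db, dk, _ => (db, dk)
  | seg :: rest, db, dk, instr =>
    if instr = false then
      pvLoopB rest (db + (PySem.List.count seg '{' : Int) - (PySem.List.count seg '}' : Int))
                   (dk + (PySem.List.count seg '[' : Int) - (PySem.List.count seg ']' : Int)) true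
    else if pvRunBS seg % 2 = 0 then pvLoopB rest db dk false
    else pvLoopB rest db dk true

def check_json_truncated_py_alt (text : String) : Bool :=
  if text = "" ∨ PySem.Str.len text < 50 then false
  else
    let st := pvLoopB (pvSplitQ text.toList) 0 0 false
    decide (st.1 > 0) || decide (st.2 > 0)

-- ===== PRECONDITION & SPEC =====
def Spec_check_json_truncated_py (text : String) (out : Bool) : Prop := out = check_json_truncated_py_alt text
instance (text : String) (out : Bool) : Decidable (Spec_check_json_truncated_py text out) := by unfold Spec_check_json_truncated_py; infer_instance

-- ===== CLAIM (what is proved, stated in full; the proofs are below) =====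
def Claim_equal_check_json_truncated_py : Prop := ∀ (text : String), Dom_check_json_truncated_py text → Spec_check_json_truncated_py text (check_json_truncated_py text)

-- ===== LEMMAS AND PROOFS =====

-- trailing backslash run, in takeWhile form
def pvTW (seg : List Char) : Nat := (seg.reverse.takeWhile (fun c => c == '\\')).length

theorem pvRunBS_eq_pvTW (seg : List Char) : pvRunBS seg = pvTW seg := by
  unfold pvRunBS pvTW
  have h := congrArg List.length (List.takeWhile_append_dropWhile (p := fun c => c == '\\') (l := seg.reverse))
  simp only [List.length_append, List.length_reverse] at *
  omega

theorem pvTW_aux (p : Char → Bool) : ∀ (xs : List Char) (c : Char),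
    ((xs ++ [c]).takeWhile p).length =
      if xs.all p then (if p c then xs.length + 1 else xs.length)
      else (xs.takeWhile p).length := by
  intro xs c
  induction xs with
  | nil => by_cases h : p c <;> simp [List.takeWhile, h]
  | cons x xs ih =>
    by_cases hx : p x
    · simp [hx, ih]
      split_ifs <;> simp
    · simp [hx]

theorem pvTW_cons_ne (c : Char) (s : List Char) (h : ¬ c = '\\') : pvTW (c :: s) = pvTW s := by
  unfold pvTW
  rw [List.reverse_cons, pvTW_aux]
  have hc : ((fun c => c == '\\') c) = false := by simp [h]
  by_cases ha : s.reverse.all (fun c => c == '\\')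
  · have hself : s.reverse.takeWhile (fun c => c == '\\') = s.reverse :=
      List.takeWhile_eq_self_iff.mpr (by intro a ha'; exact (List.all_eq_true.mp ha) a ha')
    simp [ha, hc, hself]
  · simp [ha]

theorem pvTW_bs2 (d : Char) (s : List Char) : pvTW ('\\' :: d :: s) % 2 = pvTW s % 2 := by
  unfold pvTW
  have hrev : ('\\' :: d :: s).reverse = (s.reverse ++ [d]) ++ ['\\'] := by simp
  rw [hrev, pvTW_aux]
  by_cases hs : s.reverse.all (fun c => c == '\\')
  · have hself : s.reverse.takeWhile (fun c => c == '\\') = s.reverse :=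
      List.takeWhile_eq_self_iff.mpr (by intro a ha'; exact (List.all_eq_true.mp hs) a ha')
    by_cases hd : d = '\\'
    · have hall : (s.reverse ++ [d]).all (fun c => c == '\\') = true := by
        simp [List.all_append, hs, hd]
      simp [hall, hself]
      omega
    · have hall : (s.reverse ++ [d]).all (fun c => c == '\\') = false := by
        simp [List.all_append, hd]
      simp [hall, pvTW_aux, hs, hd, hself]
  · have hsb : s.reverse.all (fun c => c == '\\') = false := by
      cases hA : s.reverse.all (fun c => c == '\\') with
      | false => rfl
      | true => exact absurd hA hs
    have hall : (s.reverse ++ [d]).all (fun c => c == '\\') = false := by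
      simp [List.all_append, hsb]
    simp [hall, pvTW_aux, hs]

theorem pvSplitQ_ne_nil : ∀ cs : List Char, pvSplitQ cs ≠ [] := by
  intro cs
  match cs with
  | [] => simp [pvSplitQ]
  | c :: cs' =>
    unfold pvSplitQ
    split_ifs
    · simp
    · cases h : pvSplitQ cs' <;> simp

-- Main invariant: A's loop from either quote-state equals B's segment loop on the split.
theorem pvLoop_key : ∀ n (cs : List Char), cs.length ≤ n → ∀ db dk : Int,
    pvLoopA cs db dk false false = pvLoopB (pvSplitQ cs) db dk false
    ∧ pvLoopA cs db dk true false = pvLoopB (pvSplitQ cs) db dk true := by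
  intro n
  induction n with
  | zero =>
    intro cs h db dk
    have : cs = [] := List.eq_nil_of_length_eq_zero (Nat.le_zero.mp h)
    subst this
    refine ⟨by simp [pvLoopA, pvSplitQ, pvLoopB, PySem.List.count], ?_⟩
    simp [pvLoopA, pvSplitQ, pvLoopB, pvRunBS]
  | succ m ih =>
    intro cs h db dk
    match cs with
    | [] =>
      refine ⟨by simp [pvLoopA, pvSplitQ, pvLoopB, PySem.List.count], ?_⟩
      simp [pvLoopA, pvSplitQ, pvLoopB, pvRunBS]
    | c :: cs' =>
      have hlen : cs'.length ≤ m := by simpa using h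
      constructor
      · -- out-of-string
        by_cases hq : c = '"'
        · subst hq
          have h2 := (ih cs' hlen db dk).2
          simp only [pvSplitQ]
          rw [show pvLoopA ('"' :: cs') db dk false false = pvLoopA cs' db dk true false by
            simp [pvLoopA]]
          rw [h2]
          simp [pvLoopB, PySem.List.count]
        · obtain ⟨s, r, hsr⟩ : ∃ s r, pvSplitQ cs' = s :: r := by
            cases hx : pvSplitQ cs' with
            | nil => exact absurd hx (pvSplitQ_ne_nil cs')
            | cons s r => exact ⟨s, r, rfl⟩
          have hsplit : pvSplitQ (c :: cs') = (c :: s) :: r := by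
            unfold pvSplitQ; simp [hq, hsr]
          have h1 := fun db dk => (ih cs' hlen db dk).1
          rw [hsplit]
          have step : ∀ db dk : Int, pvLoopB ((c :: s) :: r) db dk false =
              pvLoopB (s :: r) (db + (if c = '{' then 1 else 0) - (if c = '}' then 1 else 0))
                      (dk + (if c = '[' then 1 else 0) - (if c = ']' then 1 else 0)) false := by
            intro db dk
            simp only [pvLoopB, PySem.List.count_eq, List.count_cons]
            split_ifs <;> simp_all <;> ring_nf
          rw [step]
          rw [← hsr, ← h1]
          by_cases hb : c = '{' <;> by_cases hc2 : c = '}' <;> by_cases hd : c = '[' <;> by_cases he : c = ']' <;>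
            simp_all [pvLoopA]
      · -- in-string (esc = false entering)
        by_cases hq : c = '"'
        · subst hq
          have h1 := (ih cs' hlen db dk).1
          simp only [pvSplitQ]
          rw [show pvLoopA ('"' :: cs') db dk true false = pvLoopA cs' db dk false false by
            simp [pvLoopA]]
          rw [h1]
          simp [pvLoopB, pvRunBS]
        · obtain ⟨s, r, hsr⟩ : ∃ s r, pvSplitQ cs' = s :: r := by
            cases hx : pvSplitQ cs' with
            | nil => exact absurd hx (pvSplitQ_ne_nil cs')
            | cons s r => exact ⟨s, r, rfl⟩
          by_cases hbs : c = '\\'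
          · subst hbs
            match cs' with
            | [] =>
              -- lone trailing backslash: string stays open, segment is ['\\'], run odd
              have hrun : ¬ pvRunBS ['\\'] % 2 = 0 := by decide
              simp [pvLoopA, pvSplitQ, pvLoopB, hrun]
            | d :: cs'' =>
              have hlen2 : cs''.length ≤ m := by simp at h; omega
              have h2 := (ih cs'' hlen2 db dk).2
              obtain ⟨s2, r2, hsr2⟩ : ∃ s2 r2, pvSplitQ cs'' = s2 :: r2 := by
                cases hx : pvSplitQ cs'' with
                | nil => exact absurd hx (pvSplitQ_ne_nil cs'')
                | cons s2 r2 => exact ⟨s2, r2, rfl⟩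
              -- A consumes the escaped pair '\\', d
              have hA : pvLoopA ('\\' :: d :: cs'') db dk true false = pvLoopA cs'' db dk true false := by
                simp [pvLoopA]
              -- pvSplitQ ('\\' :: d :: cs'') head gets '\\' and d prepended (d may be '"')
              by_cases hdq : d = '"'
              · subst hdq
                have hsplit : pvSplitQ ('\\' :: '"' :: cs'') = ['\\'] :: pvSplitQ cs'' := by
                  simp [pvSplitQ]
                rw [hA, hsplit, h2, hsr2]
                have : pvRunBS ['\\'] % 2 = 1 := by decide
                simp [pvLoopB, this]
              · have hsplit : pvSplitQ ('\\' :: d :: cs'') = ('\\' :: d :: s2) :: r2 := by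
                  unfold pvSplitQ
                  simp only [if_neg (by decide : ¬ ('\\' : Char) = '"')]
                  unfold pvSplitQ
                  simp [hdq, hsr2]
                rw [hA, hsplit, h2, hsr2]
                have hpar : pvRunBS ('\\' :: d :: s2) % 2 = pvRunBS s2 % 2 := by
                  rw [pvRunBS_eq_pvTW, pvRunBS_eq_pvTW]; exact pvTW_bs2 d s2
                by_cases he : pvRunBS s2 % 2 = 0
                · simp [pvLoopB, hpar, he]
                · simp [pvLoopB, hpar, he]
          · -- plain in-string char: consumed, prepended to head segment, run parity unchanged
            have h2 := (ih cs' hlen db dk).2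
            have hsplit : pvSplitQ (c :: cs') = (c :: s) :: r := by
              unfold pvSplitQ; simp [hq, hsr]
            have hA : pvLoopA (c :: cs') db dk true false = pvLoopA cs' db dk true false := by
              simp [pvLoopA, hbs, hq]
            rw [hA, hsplit, h2, hsr]
            have hpar : pvRunBS (c :: s) % 2 = pvRunBS s % 2 := by
              rw [pvRunBS_eq_pvTW, pvRunBS_eq_pvTW, pvTW_cons_ne c s hbs]
            by_cases he : pvRunBS s % 2 = 0
            · simp [pvLoopB, hpar, he]
            · simp [pvLoopB, hpar, he]

-- ===== VERDICT (by name: the statement is the Claim_ definition above) =====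
theorem check_json_truncated_py_spec : Claim_equal_check_json_truncated_py := by
  unfold Claim_equal_check_json_truncated_py
  intro text _
  unfold Spec_check_json_truncated_py check_json_truncated_py check_json_truncated_py_alt
  split_ifs with hg
  · rfl
  · rw [(pvLoop_key text.toList.length text.toList le_rfl 0 0).1]
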